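-- pv_equiv track=rewrite | github.com/pypi-data/pypi-mirror-361 | packages/atr-dan/atr_dan-0.2.2rc2.tar.gz/atr_dan-0.2.2rc2/dan/ocr/utils.py | build_batch_sizes
-- ===== SOURCE A (Python) =====
-- from typing import Dict, Iterator, List, Optional
--
-- def build_batch_sizes(batch_size: int) -> Iterator[int]:
--     """
--     Build a list of integers by dividing the previous one by 2.
--     If the resulting integer is not even, take the nearest multiple of 4.
--     """
--     # The minimum batch size is always 1
--     if batch_size < 1:
--         return
--
--     yield batch_size
--
--     next_batch_size = batch_size // 2
--     next_batch_size = (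
--         # If the result is not even, we take the nearest multiple of 4
--         next(
--             filter(
--                 lambda potential_next_batch_size: not potential_next_batch_size % 4,
--                 [next_batch_size - 1, next_batch_size, next_batch_size + 1],
--             )
--         )
--         if next_batch_size % 2 and next_batch_size != 1
--         else next_batch_size
--     )
--
--     yield from build_batch_sizes(next_batch_size)
-- ===== SOURCE B (Python) =====
-- def build_batch_sizes(batch_size: int):
--     """Iterative generator: halve, aligning odd halves to the nearest multiple of 4."""
--     cur = batch_size
--     while cur >= 1:
--         yield cur
--         nxt = cur // 2
--         if nxt % 2 and nxt != 1:
--             nxt = nxt - 1 if (nxt - 1) % 4 == 0 else nxt + 1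
--         cur = nxt
-- ===== Notes on version B (the rewrite author's own statement) =====
-- stated objective: simpler
-- what changed: Replaces the recursive generator with filter/next alignment by an iterative while-loop that yields and aligns via a direct two-branch conditional instead of filtering a three-element candidate list.
import Mathlib
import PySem

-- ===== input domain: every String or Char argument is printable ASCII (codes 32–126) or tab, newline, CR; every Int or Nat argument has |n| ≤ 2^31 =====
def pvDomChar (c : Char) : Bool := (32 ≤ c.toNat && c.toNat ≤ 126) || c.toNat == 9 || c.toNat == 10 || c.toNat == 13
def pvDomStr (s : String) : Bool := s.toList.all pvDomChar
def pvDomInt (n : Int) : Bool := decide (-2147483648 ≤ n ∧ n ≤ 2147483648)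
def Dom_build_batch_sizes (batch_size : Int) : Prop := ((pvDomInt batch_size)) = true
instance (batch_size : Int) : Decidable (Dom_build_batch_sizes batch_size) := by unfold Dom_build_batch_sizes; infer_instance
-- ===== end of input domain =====

-- B replaces A's recursive generator (filter/next over three candidates) by an iterative
-- yield-loop with a direct two-branch alignment; same values, same cost (objective: simpler).
-- Both ports carry a fuel counter (batch_size.toNat + 1) purely to make the same computation
-- total in Lean: the batch size strictly shrinks each step, so the 0-fuel branch is unreachable.

-- ===== PORT A =====
-- A's `next(filter(...))` is ported as `headD 0`: for odd n ≠ 1 one of n-1, n+1 is a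
-- multiple of 4, so the filtered list is provably nonempty and Python never raises.
def pvLoopA (fuel : Nat) (batch_size : Int) : List Int :=
  match fuel with
  | 0 => []
  | fuel + 1 =>
    if batch_size < 1 then []
    else
      let n := PySem.Int.floordiv batch_size 2
      let next : Int :=
        if PySem.Int.mod n 2 ≠ 0 ∧ n ≠ 1 then
          (([n - 1, n, n + 1].filter (fun p => PySem.Int.mod p 4 == 0)).headD 0)
        else n
      batch_size :: pvLoopA fuel next

def build_batch_sizes (batch_size : Int) : List Int :=
  pvLoopA (batch_size.toNat + 1) batch_size

-- ===== PORT B =====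
def pvAlignB (n : Int) : Int :=
  if PySem.Int.mod n 2 ≠ 0 ∧ n ≠ 1 then
    (if PySem.Int.mod (n - 1) 4 = 0 then n - 1 else n + 1)
  else n

-- the while-loop of B, collecting yields into an accumulator
def pvLoopB (fuel : Nat) (cur : Int) (acc : List Int) : List Int :=
  match fuel with
  | 0 => acc.reverse
  | fuel + 1 =>
    if cur < 1 then acc.reverse
    else pvLoopB fuel (pvAlignB (PySem.Int.floordiv cur 2)) (cur :: acc)

def build_batch_sizes_alt (batch_size : Int) : List Int :=
  pvLoopB (batch_size.toNat + 1) batch_size []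

-- ===== PRECONDITION & SPEC =====
def Spec_build_batch_sizes (batch_size : Int) (out : List Int) : Prop := out = build_batch_sizes_alt batch_size
instance (batch_size : Int) (out : List Int) : Decidable (Spec_build_batch_sizes batch_size out) := by unfold Spec_build_batch_sizes; infer_instance

-- ===== CLAIM (what is proved, stated in full; the proofs are below) =====
def Claim_equal_build_batch_sizes : Prop := ∀ (batch_size : Int), Dom_build_batch_sizes batch_size → Spec_build_batch_sizes batch_size (build_batch_sizes batch_size)

-- ===== LEMMAS AND PROOFS =====
-- B's two-branch alignment computes exactly A's `next(filter(...))` expression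
theorem pvAlignB_eq_next (n : Int) :
    pvAlignB n =
    (if PySem.Int.mod n 2 ≠ 0 ∧ n ≠ 1 then
        (([n - 1, n, n + 1].filter (fun p => PySem.Int.mod p 4 == 0)).headD 0)
      else n) := by
  unfold pvAlignB
  by_cases hodd : PySem.Int.mod n 2 ≠ 0 ∧ n ≠ 1
  · rw [if_pos hodd, if_pos hodd]
    have hm2 := PySem.Int.mod_eq_emod_of_pos (a := n) (b := 2) (by omega)
    have hne : n % 2 = 1 := by
      have := Int.emod_emod_of_dvd n (by norm_num : (2:Int) ∣ 2)
      rcases hodd with ⟨h0, _⟩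
      omega
    have hm4a := PySem.Int.mod_eq_emod_of_pos (a := n - 1) (b := 4) (by omega)
    have hm4b := PySem.Int.mod_eq_emod_of_pos (a := n) (b := 4) (by omega)
    have hm4c := PySem.Int.mod_eq_emod_of_pos (a := n + 1) (b := 4) (by omega)
    have h4 : n % 4 = 1 ∨ n % 4 = 3 := by omega
    rcases h4 with h4 | h4
    · have e0 : ((n - 1) % 4) = 0 := by omega
      simp [List.filter, e0]
    · have f1 : ((n - 1) % 4 == 0) = false := by simpa using by omega
      have f2 : ((n : Int) % 4 == 0) = false := by simpa using by omega
      have e3 : ((n + 1) % 4) = 0 := by omega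
      simp [List.filter, f1, f2, e3]
      omega
  · rw [if_neg hodd, if_neg hodd]

-- B's accumulator loop runs in lockstep with A's recursion, for any fuel
theorem pvLoopB_eq (fuel : Nat) (cur : Int) (acc : List Int) :
    pvLoopB fuel cur acc = acc.reverse ++ pvLoopA fuel cur := by
  induction fuel generalizing cur acc with
  | zero => simp [pvLoopA, pvLoopB]
  | succ fuel ih =>
      rw [pvLoopA, pvLoopB]
      by_cases h : cur < 1
      · simp [h]
      · simp only [if_neg h]
        rw [ih, pvAlignB_eq_next]
        simp

-- ===== VERDICT (by name: the statement is the Claim_ definition above) =====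
theorem build_batch_sizes_spec : Claim_equal_build_batch_sizes := by
  intro bs _
  unfold Spec_build_batch_sizes build_batch_sizes_alt build_batch_sizes
  rw [pvLoopB_eq]
  simp
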